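-- pv_equiv track=rewrite | github.com/ERATOMMSD/dynamic-shielding | python/benchmarks/car_racing/car_racing_specifications.py | no_grass_duration
-- ===== SOURCE A (Python) =====
-- from typing import List
--
-- def no_grass_duration(duration: int) -> str:
--     """
--     Args:
--         duration: int : the duration with no grass. We assume that duration is positive.
--     """
--     if duration <= 0:
--         raise IndexError(f'duration must be positive (duration: {duration})')
--
--     def add_next(original_formula: str) -> str:
--         return f'X({original_formula})'
--
--     formulas: List[str] = []
--     for i in range(duration):
--         formula = 'ArenaProposition.NORMAL'
--         for j in range(i):
--             formula = add_next(formula)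
--         formulas.append(f'({formula})')
--     return ' & '.join(formulas)
-- ===== SOURCE B (Python) =====
-- def no_grass_duration(duration: int) -> str:
--     """Incremental: wrap the previous formula once per step instead of rebuilding it."""
--     if duration <= 0:
--         raise IndexError(f'duration must be positive (duration: {duration})')
--     parts = []
--     formula = 'ArenaProposition.NORMAL'
--     for _ in range(duration):
--         parts.append(f'({formula})')
--         formula = f'X({formula})'
--     return ' & '.join(parts)
-- ===== Notes on version B (the rewrite author's own statement) =====
-- stated objective: faster
-- what changed: B keeps the current nested formula across iterations and wraps it once per step, instead of rebuilding each formula from the base with an inner loop.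
import Mathlib
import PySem

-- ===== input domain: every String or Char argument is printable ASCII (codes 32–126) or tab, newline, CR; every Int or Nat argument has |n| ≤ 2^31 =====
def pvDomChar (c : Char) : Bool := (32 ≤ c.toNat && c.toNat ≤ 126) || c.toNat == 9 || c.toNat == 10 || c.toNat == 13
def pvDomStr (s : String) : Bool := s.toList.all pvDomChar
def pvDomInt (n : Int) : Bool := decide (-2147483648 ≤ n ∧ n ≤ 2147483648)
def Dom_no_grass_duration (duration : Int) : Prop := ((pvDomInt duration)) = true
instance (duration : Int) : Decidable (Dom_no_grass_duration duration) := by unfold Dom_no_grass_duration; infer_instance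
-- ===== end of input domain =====

-- B wraps the previous formula once per iteration (O(n^2)) instead of rebuilding
-- each conjunct from the base with an inner loop as A does (O(n^3)).

-- ===== PORT A =====
-- add_next(f) = f'X({f})'
def pvAddNext (s : String) : String := "X(" ++ s ++ ")"

def no_grass_duration (duration : Int) : String :=
  let formulas : List String :=
    (PySem.List.pyRange 0 duration 1).foldl
      (fun acc i =>
        acc ++ ["(" ++ (PySem.List.pyRange 0 i 1).foldl (fun f _ => pvAddNext f) "ArenaProposition.NORMAL" ++ ")"])
      []
  PySem.Str.join " & " formulas

-- ===== PORT B =====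
def no_grass_duration_alt (duration : Int) : String :=
  let st : List String × String :=
    (PySem.List.pyRange 0 duration 1).foldl
      (fun st _ => (st.1 ++ ["(" ++ st.2 ++ ")"], "X(" ++ st.2 ++ ")"))
      ([], "ArenaProposition.NORMAL")
  PySem.Str.join " & " st.1

-- ===== PRECONDITION & SPEC =====
-- A raises IndexError for duration <= 0; exactly those inputs are excluded.
def Pre_no_grass_duration (duration : Int) : Prop := 0 < duration
instance (duration : Int) : Decidable (Pre_no_grass_duration duration) := by
  unfold Pre_no_grass_duration; infer_instance
def pvWitness_no_grass_duration : Int := (3)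

def Spec_no_grass_duration (duration : Int) (out : String) : Prop := out = no_grass_duration_alt duration
instance (duration : Int) (out : String) : Decidable (Spec_no_grass_duration duration out) := by unfold Spec_no_grass_duration; infer_instance

-- ===== CLAIM =====
def Claim_equal_no_grass_duration : Prop := ∀ (duration : Int), Dom_no_grass_duration duration → Pre_no_grass_duration duration → Spec_no_grass_duration duration (no_grass_duration duration)

-- ===== LEMMAS AND PROOFS =====

-- A's inner loop applies add_next once per element of the range.
theorem pv_inner (l : List Int) (s : String) :
    l.foldl (fun f _ => pvAddNext f) s = pvAddNext^[l.length] s := by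
  induction l generalizing s with
  | nil => rfl
  | cons a t ih => simp [List.foldl, ih, Function.iterate_succ_apply]

-- Joint invariant of the two outer loops.
theorem pv_main (n : Nat) :
    (PySem.List.pyRange 0 (n : Int) 1).foldl
      (fun (st : List String × String) _ => (st.1 ++ ["(" ++ st.2 ++ ")"], "X(" ++ st.2 ++ ")"))
      ([], "ArenaProposition.NORMAL")
    = ((PySem.List.pyRange 0 (n : Int) 1).foldl
        (fun acc i =>
          acc ++ ["(" ++ (PySem.List.pyRange 0 i 1).foldl (fun f _ => pvAddNext f) "ArenaProposition.NORMAL" ++ ")"])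
        [],
       pvAddNext^[n] "ArenaProposition.NORMAL") := by
  induction n with
  | zero => simp [PySem.List.pyRange_one_eq_nil]
  | succ n ih =>
      have h : (PySem.List.pyRange 0 ((n : Int) + 1) 1)
          = PySem.List.pyRange 0 (n : Int) 1 ++ [(n : Int)] := by
        exact PySem.List.pyRange_one_succ_right (by positivity)
      push_cast
      rw [h, List.foldl_append, List.foldl_append, ih]
      simp only [List.foldl_cons, List.foldl_nil]
      rw [pv_inner]
      simp [PySem.List.length_pyRange_one, Function.iterate_succ_apply', pvAddNext]

-- ===== VERDICT =====
theorem no_grass_duration_spec : Claim_equal_no_grass_duration := by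
  intro d _ hpre
  unfold Spec_no_grass_duration no_grass_duration no_grass_duration_alt
  have hd : ((d.toNat : Int)) = d := Int.toNat_of_nonneg (le_of_lt hpre)
  rw [← hd, pv_main]
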